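-- pv_equiv track=rewrite | github.com/mattkistner/CS-1301 | HW11.py | buyTickets
-- ===== SOURCE A (Python) =====
-- def buyTickets(ticketPrices):
--     price = 1000
--     for options in ticketPrices:
--         for prices in ticketPrices[options]:
--             if prices[1] < price:
--                 price = prices[1]
--     for options in ticketPrices:
--         for prices in ticketPrices[options]:
--             if prices[1] == price:
--                 return "Buy tickets from {} at {}pm.".format(options, prices[0])
-- ===== SOURCE B (Python) =====
-- def buyTickets(ticketPrices):
--     entries = [(price, seller, hour)
--                for seller, hps in ticketPrices.items()
--                for hour, price in hps
--                if price <= 1000]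
--     if entries:
--         price, seller, hour = min(entries, key=lambda t: t[0])
--         return "Buy tickets from {} at {}pm.".format(seller, hour)
-- ===== Notes on version B (the rewrite author's own statement) =====
-- stated objective: simpler
-- what changed: Replaces A's two nested-loop passes (capped running minimum, then a re-scan with dict lookups for the first match) by one flat comprehension of affordable (price, seller, hour) tuples and a single min(..., key=...) call, whose first-minimum rule reproduces A's tie-breaking.
-- outside the precondition, e.g. on buyTickets({}): A returns None, B returns None; on buyTickets({'A': [(7, 2000)]}): A returns None, B returns None
import Mathlib
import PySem

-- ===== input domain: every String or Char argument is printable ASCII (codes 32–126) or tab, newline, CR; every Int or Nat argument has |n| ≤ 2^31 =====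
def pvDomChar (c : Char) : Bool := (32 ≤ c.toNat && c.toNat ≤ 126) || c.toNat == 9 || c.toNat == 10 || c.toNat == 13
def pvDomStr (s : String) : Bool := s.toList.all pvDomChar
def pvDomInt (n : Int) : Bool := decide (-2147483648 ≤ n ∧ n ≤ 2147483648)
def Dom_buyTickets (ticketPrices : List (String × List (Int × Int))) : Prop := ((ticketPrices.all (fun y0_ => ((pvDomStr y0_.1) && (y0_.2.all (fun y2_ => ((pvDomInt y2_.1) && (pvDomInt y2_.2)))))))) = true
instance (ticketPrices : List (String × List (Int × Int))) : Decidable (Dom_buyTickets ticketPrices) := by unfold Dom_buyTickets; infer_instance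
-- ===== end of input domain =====

-- B collapses A's two nested-loop passes (capped running minimum, then a lookup-driven re-scan
-- for the first match) into one flat list of affordable entries and a single first-minimum scan
-- (objective: simpler). Equivalence is about the return value; A raises nothing and mutates nothing.


-- shared formatting helper: "Buy tickets from {} at {}pm.".format(seller, hour)
def pvFmt (seller : String) (hour : Int) : String :=
  "Buy tickets from " ++ seller ++ " at " ++ PySem.Int.toStr hour ++ "pm."

-- ===== PORT A =====
-- ticketPrices[options]: first-match dict lookup (keys of a Python dict are unique; Pre_ states that)
def pvLookup (tp : List (String × List (Int × Int))) (k : String) : List (Int × Int) :=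
  match tp.find? (fun kv => kv.1 == k) with
  | some kv => kv.2
  | none => []

-- second pass, inner loop: first (hour, price) with price == the minimum, already formatted
def pvFindInner (seller : String) (price : Int) : List (Int × Int) → Option String
  | [] => none
  | hp :: rest => if hp.2 = price then some (pvFmt seller hp.1) else pvFindInner seller price rest

-- second pass, outer loop over the sellers (re-looking each seller up, as A does)
def pvFindOuter (tp : List (String × List (Int × Int))) (price : Int) :
    List (String × List (Int × Int)) → Option String
  | [] => none
  | kv :: rest =>
    match pvFindInner kv.1 price (pvLookup tp kv.1) with
    | some s => some s
    | none => pvFindOuter tp price rest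

def buyTickets (ticketPrices : List (String × List (Int × Int))) : String :=
  let price := ticketPrices.foldl
    (fun pr kv => (pvLookup ticketPrices kv.1).foldl
      (fun pr2 hp => if hp.2 < pr2 then hp.2 else pr2) pr) 1000
  -- A falls off the end (returning None) when nothing is priced ≤ 1000; Pre_ excludes that,
  -- so the .getD "" default is never reached on admitted inputs.
  (pvFindOuter ticketPrices price ticketPrices).getD ""

-- ===== PORT B =====
def buyTickets_alt (ticketPrices : List (String × List (Int × Int))) : String :=
  let entries := ticketPrices.flatMap
    (fun kv => kv.2.filterMap (fun hp => if hp.2 ≤ 1000 then some (hp.2, kv.1, hp.1) else none))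
  match PySem.List.min? entries (fun t => t.1) with
  | some t => pvFmt t.2.1 t.2.2
  | none => ""

-- ===== PRECONDITION & SPEC =====
-- Pre_ excludes (a) inputs with no ticket priced ≤ 1000, where Python A falls through and returns
-- None instead of a string, and (b) association lists with duplicate seller keys, which cannot
-- arise from a Python dict (A iterates keys and looks each one up, so duplicates are meaningless).
def Pre_buyTickets (ticketPrices : List (String × List (Int × Int))) : Prop :=
  (ticketPrices.map Prod.fst).Nodup ∧ ∃ kv ∈ ticketPrices, ∃ hp ∈ kv.2, hp.2 ≤ 1000
instance (ticketPrices : List (String × List (Int × Int))) : Decidable (Pre_buyTickets ticketPrices) := by unfold Pre_buyTickets; infer_instance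

def pvWitness_buyTickets : (List (String × List (Int × Int))) := [("Stub", [(7, 50), (8, 40)]), ("Hub", [(9, 40)])]

def Spec_buyTickets (ticketPrices : List (String × List (Int × Int))) (out : String) : Prop := out = buyTickets_alt ticketPrices
instance (ticketPrices : List (String × List (Int × Int))) (out : String) : Decidable (Spec_buyTickets ticketPrices out) := by unfold Spec_buyTickets; infer_instance

-- ===== CLAIM (what is proved, stated in full; the proofs are below) =====
def Claim_equal_buyTickets : Prop := ∀ (ticketPrices : List (String × List (Int × Int))), Dom_buyTickets ticketPrices → Pre_buyTickets ticketPrices → Spec_buyTickets ticketPrices (buyTickets ticketPrices)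

-- ===== LEMMAS AND PROOFS =====
-- abbreviations for the proofs
def pvMinStep (pr : Int) (t : Int × String × Int) : Int := if t.1 < pr then t.1 else pr

def pvFlat (tp : List (String × List (Int × Int))) : List (Int × String × Int) :=
  tp.flatMap (fun kv => kv.2.map (fun hp => (hp.2, kv.1, hp.1)))

-- with nodup keys, looking a member's key up returns its own value
lemma pvLookup_self (tp : List (String × List (Int × Int)))
    (h : (tp.map Prod.fst).Nodup) {kv} (hm : kv ∈ tp) : pvLookup tp kv.1 = kv.2 := by
  induction tp with
  | nil => cases hm
  | cons a tl ih =>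
    simp only [List.map_cons, List.nodup_cons] at h
    rcases List.mem_cons.mp hm with rfl | hm'
    · simp [pvLookup]
    · have hne : ¬ ((a.1 == kv.1) = true) := by
        simp only [beq_iff_eq]
        intro he
        exact h.1 (he ▸ List.mem_map_of_mem hm')
      unfold pvLookup
      rw [List.find?_cons_of_neg (p := fun kv_1 => kv_1.1 == kv.1) (a := a) (l := tl) hne]
      have := ih h.2 hm'
      unfold pvLookup at this
      exact this

-- A's first pass is the capped running minimum over the flattened entries
lemma pvPriceA (tp : List (String × List (Int × Int))) (h : (tp.map Prod.fst).Nodup) :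
    tp.foldl (fun pr kv => (pvLookup tp kv.1).foldl
      (fun pr2 hp => if hp.2 < pr2 then hp.2 else pr2) pr) 1000
    = (pvFlat tp).foldl pvMinStep 1000 := by
  rw [PySem.List.foldl_congr_mem tp _
    (fun pr kv => kv.2.foldl (fun pr2 hp => if hp.2 < pr2 then hp.2 else pr2) pr) 1000
    (fun pr kv hkv => by rw [pvLookup_self tp h hkv])]
  have gen : ∀ (l : List (String × List (Int × Int))) (init : Int),
      l.foldl (fun pr kv => kv.2.foldl (fun pr2 hp => if hp.2 < pr2 then hp.2 else pr2) pr) init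
      = (pvFlat l).foldl pvMinStep init := by
    intro l
    induction l with
    | nil => intro _; rfl
    | cons a tl ih =>
      intro init
      simp only [List.foldl_cons, pvFlat, List.flatMap_cons, List.foldl_append, List.foldl_map]
      simp only [pvFlat] at ih
      rw [ih]
      rfl
  exact gen tp 1000

-- A's second pass is find? over the flattened entries
lemma pvFindA (tp : List (String × List (Int × Int))) (h : (tp.map Prod.fst).Nodup) (price : Int) :
    pvFindOuter tp price tp
    = ((pvFlat tp).find? (fun t => t.1 == price)).map (fun t => pvFmt t.2.1 t.2.2) := by
  have inner : ∀ (s : String) (l : List (Int × Int)),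
      pvFindInner s price l
      = ((l.map (fun hp => (hp.2, s, hp.1))).find? (fun t => t.1 == price)).map
          (fun t => pvFmt t.2.1 t.2.2) := by
    intro s l
    induction l with
    | nil => rfl
    | cons hp rest ihl =>
      by_cases hc : hp.2 = price
      · simp [pvFindInner, hc]
      · have hb : ¬ ((((hp.2, s, hp.1) : Int × String × Int).1 == price) = true) := by simpa using hc
        simp only [pvFindInner, if_neg hc, List.map_cons]
        rw [List.find?_cons_of_neg (p := fun t => t.1 == price) (a := ((hp.2, s, hp.1) : Int × String × Int)) (l := rest.map (fun hp => (hp.2, s, hp.1))) hb]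
        exact ihl
  have aux : ∀ l : List (String × List (Int × Int)), (∀ kv ∈ l, kv ∈ tp) →
      pvFindOuter tp price l
      = ((l.flatMap (fun kv => kv.2.map (fun hp => (hp.2, kv.1, hp.1)))).find?
          (fun t => t.1 == price)).map (fun t => pvFmt t.2.1 t.2.2) := by
    intro l
    induction l with
    | nil => intro _; rfl
    | cons kv rest ihl =>
      intro hsub
      have hkv : kv ∈ tp := hsub kv List.mem_cons_self
      have hrest := ihl (fun x hx => hsub x (List.mem_cons_of_mem _ hx))
      show (match pvFindInner kv.1 price (pvLookup tp kv.1) with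
            | some s => some s
            | none => pvFindOuter tp price rest) = _
      rw [pvLookup_self tp h hkv, inner kv.1 kv.2, hrest, List.flatMap_cons, List.find?_append]
      rcases hfe : (kv.2.map (fun hp => (hp.2, kv.1, hp.1))).find? (fun t => t.1 == price) with _ | t
      · rw [hfe]; rfl
      · rw [hfe]; rfl
  exact aux tp (fun _ hx => hx)

-- B's comprehension is the filter of the flattened entries
lemma pvEntriesB (tp : List (String × List (Int × Int))) :
    tp.flatMap (fun kv => kv.2.filterMap (fun hp => if hp.2 ≤ 1000 then some (hp.2, kv.1, hp.1) else none))
    = (pvFlat tp).filter (fun t => t.1 ≤ 1000) := by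
  simp only [pvFlat]
  induction tp with
  | nil => rfl
  | cons a tl ih =>
    simp only [List.flatMap_cons, List.filter_append, ih]
    congr 1
    induction a.2 with
    | nil => rfl
    | cons hp rest ihl =>
      by_cases hc : hp.2 ≤ 1000
      · simp [hc, ihl]
      · simp [hc, ihl]

-- facts about the capped running minimum
lemma pvFoldMin_facts (es : List (Int × String × Int)) (pr : Int) :
    (es.foldl pvMinStep pr ≤ pr ∧ ∀ t ∈ es, es.foldl pvMinStep pr ≤ t.1) ∧
    (es.foldl pvMinStep pr = pr ∨ ∃ t ∈ es, t.1 = es.foldl pvMinStep pr) := by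
  induction es generalizing pr with
  | nil => exact ⟨⟨le_refl _, by simp⟩, Or.inl rfl⟩
  | cons t rest ih =>
    obtain ⟨⟨h1, h2⟩, h3⟩ := ih (pvMinStep pr t)
    have hstep : pvMinStep pr t ≤ pr ∧ (pvMinStep pr t = pr ∨ pvMinStep pr t = t.1) := by
      unfold pvMinStep; split_ifs with hlt
      · exact ⟨le_of_lt hlt, Or.inr rfl⟩
      · exact ⟨le_refl _, Or.inl rfl⟩
    refine ⟨⟨le_trans h1 hstep.1, ?_⟩, ?_⟩
    · intro u hu
      rcases List.mem_cons.mp hu with rfl | hu'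
      · rcases hstep.2 with he | he
        · have : pvMinStep pr u = u.1 ∨ pvMinStep pr u = pr := by
            unfold pvMinStep; split_ifs <;> simp
          rcases this with h' | h'
          · exact le_trans h1 (le_of_eq h')
          · have : ¬ (u.1 < pr) := by
              intro hlt
              simp only [pvMinStep, if_pos hlt] at he
              omega
            exact le_trans h1 (by rw [he]; omega)
        · exact le_trans h1 (le_of_eq he)
      · exact h2 u hu'
    · simp only [List.foldl_cons]
      rcases h3 with he | ⟨u, hu, he⟩
      · rcases hstep.2 with h' | h'
        · exact Or.inl (he.trans h')
        · exact Or.inr ⟨t, List.mem_cons_self, (he.trans h').symm⟩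
      · exact Or.inr ⟨u, List.mem_cons_of_mem _ hu, he⟩

-- min? returns the first element achieving the minimal key
lemma pvMin?_find {α : Type} (key : α → Int) (xs : List α) (m : α)
    (h : PySem.List.min? xs key = some m) :
    xs.find? (fun x => key x == key m) = some m := by
  have aux : ∀ (ys : List α) (a : α),
      ys.foldl (fun acc x => match acc with
        | none => some x
        | some mm => if key x < key mm then some x else some mm) (some a) = some m →
      key m ≤ key a ∧ (key m = key a → m = a) ∧
        (key m < key a → ys.find? (fun x => key x == key m) = some m) := by
    intro ys
    induction ys with
    | nil =>
      intro a ha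
      simp only [List.foldl_nil, Option.some.injEq] at ha
      exact ⟨le_of_eq (by rw [ha]), fun _ => ha.symm, fun hlt => absurd (le_of_eq (by rw [ha])) (not_le.mpr hlt)⟩
    | cons y ys ih =>
      intro a ha
      simp only [List.foldl_cons] at ha
      by_cases hy : key y < key a
      · rw [if_pos hy] at ha
        obtain ⟨h1, h2, h3⟩ := ih y ha
        refine ⟨le_trans h1 (le_of_lt hy), fun he => absurd (lt_of_le_of_lt (he ▸ h1) hy) (lt_irrefl _), fun _ => ?_⟩
        by_cases hym : key y = key m
        · have : m = y := h2 hym.symm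
          rw [List.find?_cons_of_pos (by simp [hym])]
          rw [this]
        · have hlt' : key m < key y := lt_of_le_of_ne h1 (fun he => hym he.symm)
          rw [List.find?_cons_of_neg (by simp; exact hym), h3 hlt']
      · rw [if_neg hy] at ha
        obtain ⟨h1, h2, h3⟩ := ih a ha
        refine ⟨h1, h2, fun hlt => ?_⟩
        have hay : key a ≤ key y := le_of_not_gt hy
        have hym : key y ≠ key m := fun he => absurd (lt_of_lt_of_le hlt (le_trans hay (le_of_eq he))) (lt_irrefl _)
        rw [List.find?_cons_of_neg (by simp; exact hym), h3 hlt]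
  rcases xs with _ | ⟨x, rest⟩
  · simp [PySem.List.min?] at h
  · simp only [PySem.List.min?, List.foldl_cons] at h
    obtain ⟨h1, h2, h3⟩ := aux rest x h
    by_cases hx : key x = key m
    · have : m = x := h2 hx.symm
      rw [List.find?_cons_of_pos (by simp [hx]), this]
    · have hlt : key m < key x := lt_of_le_of_ne h1 (fun he => hx he.symm)
      rw [List.find?_cons_of_neg (by simp; exact hx), h3 hlt]

-- the central fact: first entry priced at the capped minimum = first minimum of the affordable entries
lemma pvMain (es : List (Int × String × Int)) (h : ∃ t ∈ es, t.1 ≤ 1000) :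
    ((es.find? (fun t => t.1 == es.foldl pvMinStep 1000)).map (fun t => pvFmt t.2.1 t.2.2)).getD ""
    = match PySem.List.min? (es.filter (fun t => t.1 ≤ 1000)) (fun t => t.1) with
      | some t => pvFmt t.2.1 t.2.2
      | none => "" := by
  obtain ⟨w, hw, hwle⟩ := h
  have hwF : w ∈ es.filter (fun t => t.1 ≤ 1000) := List.mem_filter.mpr ⟨hw, by simpa using hwle⟩
  rcases hmin : PySem.List.min? (es.filter (fun t => t.1 ≤ 1000)) (fun t => t.1) with _ | m
  · rw [PySem.List.min?_eq_none_iff] at hmin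
    rw [hmin] at hwF; cases hwF
  · have hmF := PySem.List.min?_mem hmin
    have hmes : m ∈ es := List.mem_of_mem_filter hmF
    have hmle : m.1 ≤ 1000 := by simpa using List.of_mem_filter hmF
    obtain ⟨⟨hM1, hM2⟩, hM3⟩ := pvFoldMin_facts es 1000
    have hle1 : es.foldl pvMinStep 1000 ≤ m.1 := hM2 m hmes
    have hle2 : m.1 ≤ es.foldl pvMinStep 1000 := by
      rcases hM3 with he | ⟨t, ht, he⟩
      · rw [he]; exact hmle
      · have htle : t.1 ≤ 1000 := he ▸ hM1
        have htF : t ∈ es.filter (fun t => t.1 ≤ 1000) := List.mem_filter.mpr ⟨ht, by simpa using htle⟩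
        exact le_trans (PySem.List.min?_isMin hmin t htF) (le_of_eq he)
    have hMm : es.foldl pvMinStep 1000 = m.1 := le_antisymm hle1 hle2
    rw [hMm]
    have hpred : (fun (t : Int × String × Int) => t.1 == m.1)
        = (fun (a : Int × String × Int) => decide ((decide (a.1 ≤ 1000)) = true ∧ ((a.1 == m.1)) = true)) := by
      funext a
      by_cases hc : a.1 = m.1
      · simp [hc, hmle]
      · simp [hc]
    rw [hpred, ← List.find?_filter, pvMin?_find (fun t => t.1) _ m hmin, hmin]
    rfl

-- ===== VERDICT (by name: the statement is the Claim_ definition above) =====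
theorem buyTickets_spec : Claim_equal_buyTickets := by
  intro tp _ hpre
  obtain ⟨hnd, hex⟩ := hpre
  unfold Spec_buyTickets buyTickets buyTickets_alt
  show (pvFindOuter tp (tp.foldl (fun pr kv => (pvLookup tp kv.1).foldl
          (fun pr2 hp => if hp.2 < pr2 then hp.2 else pr2) pr) 1000) tp).getD ""
      = match PySem.List.min? (tp.flatMap (fun kv => kv.2.filterMap
          (fun hp => if hp.2 ≤ 1000 then some (hp.2, kv.1, hp.1) else none))) (fun t => t.1) with
        | some t => pvFmt t.2.1 t.2.2
        | none => ""
  rw [pvPriceA tp hnd, pvFindA tp hnd, pvEntriesB tp]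
  have hex' : ∃ t ∈ pvFlat tp, t.1 ≤ 1000 := by
    obtain ⟨kv, hkv, hp, hhp, hle⟩ := hex
    exact ⟨(hp.2, kv.1, hp.1), by
      simp only [pvFlat, List.mem_flatMap]
      exact ⟨kv, hkv, List.mem_map.mpr ⟨hp, hhp, rfl⟩⟩, hle⟩
  exact pvMain (pvFlat tp) hex'
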